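-- pv_equiv track=rewrite | github.com/michaelpmattson/music_scripts | genre_hierarchy.py | ensure_parent_genres
-- ===== SOURCE A (Python) =====
-- def ensure_parent_genres(genres, hierarchy):
--     expanded_genres = set(genres)
--
--     def add_parents(genre):
--         if genre in hierarchy:
--             parents = hierarchy[genre]
--             for parent in parents:
--                 if parent not in expanded_genres:
--                     expanded_genres.add(parent)
--                     add_parents(parent)
--
--     for genre in genres:
--         add_parents(genre)
--
--     return sorted(expanded_genres)
-- ===== SOURCE B (Python) =====
-- def ensure_parent_genres(genres, hierarchy):
--     expanded_genres = set(genres)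
--     stack = list(genres)
--     while stack:
--         genre = stack.pop()
--         for parent in hierarchy.get(genre, ()):
--             if parent not in expanded_genres:
--                 expanded_genres.add(parent)
--                 stack.append(parent)
--     return sorted(expanded_genres)
-- ===== Notes on version B (the rewrite author's own statement) =====
-- stated objective: alternative
-- what changed: The recursive DFS with a shared visited set is replaced by an iterative worklist traversal: an explicit stack of genres still to expand, popped in a loop, with newly discovered parents pushed; no recursion and no nested helper.
import Mathlib
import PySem

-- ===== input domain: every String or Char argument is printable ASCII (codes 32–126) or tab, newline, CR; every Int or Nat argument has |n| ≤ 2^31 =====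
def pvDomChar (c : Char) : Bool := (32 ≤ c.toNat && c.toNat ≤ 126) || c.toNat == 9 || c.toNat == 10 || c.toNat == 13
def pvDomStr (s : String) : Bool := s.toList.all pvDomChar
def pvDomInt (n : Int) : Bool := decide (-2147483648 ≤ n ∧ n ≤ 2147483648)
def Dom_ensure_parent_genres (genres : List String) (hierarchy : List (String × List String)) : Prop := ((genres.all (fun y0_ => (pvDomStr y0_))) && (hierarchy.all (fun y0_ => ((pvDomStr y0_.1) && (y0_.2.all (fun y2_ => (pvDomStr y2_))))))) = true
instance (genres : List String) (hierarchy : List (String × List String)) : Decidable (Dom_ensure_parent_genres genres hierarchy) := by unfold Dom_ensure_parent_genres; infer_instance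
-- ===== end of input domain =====

-- B replaces A's recursive DFS (nested helper + Python call stack) by an iterative
-- worklist traversal with an explicit stack; same visited set, same sorted output.

-- shared helper: the dict lookup hierarchy[g] / hierarchy.get(g, ()) with default []
def pvParents (hierarchy : List (String × List String)) (g : String) : List String :=
  PySem.Dict.getD (PySem.Dict.mk hierarchy) g []

-- all parent strings occurring in hierarchy values (termination universe only)
def pvAllP (hierarchy : List (String × List String)) : List String :=
  hierarchy.flatMap (fun p => p.2)

-- termination measure: parents of the hierarchy not yet visited
def pvCount (hierarchy : List (String × List String)) (S : List String) : Nat :=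
  (pvAllP hierarchy).countP (fun x => !decide (x ∈ S))

-- the three facts the ports' termination proofs cite
theorem pvParents_sub_allP (hierarchy : List (String × List String)) (g : String) :
    ∀ x ∈ pvParents hierarchy g, x ∈ pvAllP hierarchy := by
  intro x hx
  unfold pvParents at hx
  cases hq : PySem.Dict.get? (PySem.Dict.mk hierarchy) g with
  | none => simp [PySem.Dict.getD_eq_get?_getD, hq] at hx
  | some v =>
    simp only [PySem.Dict.getD_eq_get?_getD, hq, Option.getD_some] at hx
    have hmem : (g, v) ∈ hierarchy := by
      have := PySem.Dict.mem_items_of_get?_eq_some _ hq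
      simpa [PySem.Dict.items] using this
    exact List.mem_flatMap.2 ⟨(g, v), hmem, hx⟩

theorem pvCount_le (hierarchy : List (String × List String)) (S S' : List String)
    (h : ∀ x ∈ S, x ∈ S') : pvCount hierarchy S' ≤ pvCount hierarchy S := by
  unfold pvCount
  exact List.countP_mono_left (fun a _ hq => by
    simp only [Bool.not_eq_eq_eq_not, Bool.not_true, decide_eq_false_iff_not] at hq ⊢
    exact fun hx => hq (h a hx))

theorem pvCountP_lt (S S' : List String) (hsub : ∀ x ∈ S, x ∈ S') (p : String)
    (hpS : p ∉ S) (hpS' : p ∈ S') :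
    ∀ l : List String, p ∈ l →
      l.countP (fun x => !decide (x ∈ S')) < l.countP (fun x => !decide (x ∈ S)) := by
  intro l hp
  induction l with
  | nil => cases hp
  | cons a t ih =>
    have hle : t.countP (fun x => !decide (x ∈ S')) ≤ t.countP (fun x => !decide (x ∈ S)) :=
      List.countP_mono_left (fun b _ hb => by
        simp only [Bool.not_eq_eq_eq_not, Bool.not_true, decide_eq_false_iff_not] at hb ⊢
        exact fun hx => hb (hsub b hx))
    simp only [List.countP_cons]
    rcases List.mem_cons.1 hp with rfl | ha
    · have e1 : (!decide (p ∈ S')) = false := by simp [hpS']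
      have e2 : (!decide (p ∈ S)) = true := by simp [hpS]
      rw [e1, e2]
      simp only [Bool.false_eq_true, if_false, if_true]
      omega
    · have hlt := ih ha
      by_cases haS : a ∈ S
      · have haS' : a ∈ S' := hsub a haS
        simpa [haS, haS'] using hlt
      · have h1 : (if (!decide (a ∈ S')) = true then 1 else 0) ≤ 1 := by split <;> omega
        have h2 : (if (!decide (a ∈ S)) = true then 1 else 0) = 1 := by simp [haS]
        omega

theorem pvCount_lt (hierarchy : List (String × List String)) (S S' : List String)
    (hsub : ∀ x ∈ S, x ∈ S') (p : String) (hp : p ∈ pvAllP hierarchy)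
    (hpS : p ∉ S) (hpS' : p ∈ S') : pvCount hierarchy S' < pvCount hierarchy S :=
  pvCountP_lt S S' hsub p hpS hpS' (pvAllP hierarchy) hp

-- ===== PORT A =====
-- A's nested helper add_parents(genre), with its 'for parent in parents' loop written as
-- recursion over the parents list and the recursive call add_parents(parent) inlined at the
-- point where Python makes it.  The subtype carries the two invariants (the visited set only
-- grows, and only by parents of the hierarchy) that the well-founded termination proof needs.
def pvGoA (hierarchy : List (String × List String)) (S : PySem.Set String) (ps : List String)
    (hps : ∀ p ∈ ps, p ∈ pvAllP hierarchy) :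
    {R : PySem.Set String // (∀ x ∈ S, x ∈ R) ∧ (∀ x ∈ R, x ∈ S ∨ x ∈ pvAllP hierarchy)} :=
  match ps, hps with
  | [], _ => ⟨S, fun _ hx => hx, fun _ hx => Or.inl hx⟩
  | p :: ps', hps =>
    if hmem : p ∈ S then
      -- 'if parent not in expanded_genres' fails: continue the loop
      pvGoA hierarchy S ps' (fun q hq => hps q (List.mem_cons_of_mem _ hq))
    else
      -- expanded_genres.add(parent); add_parents(parent); then continue the loop
      let S1 := PySem.Set.add S p
      have hS1 : ∀ x ∈ S, x ∈ S1 := fun x hx => (PySem.Set.mem_add _ _ _).2 (Or.inl hx)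
      have hpS1 : p ∈ S1 := (PySem.Set.mem_add _ _ _).2 (Or.inr rfl)
      let r1 : {R : PySem.Set String //
          (∀ x ∈ S1, x ∈ R) ∧ (∀ x ∈ R, x ∈ S1 ∨ x ∈ pvAllP hierarchy)} :=
        if _hc : PySem.Dict.contains (PySem.Dict.mk hierarchy) p then
          pvGoA hierarchy S1 (pvParents hierarchy p) (pvParents_sub_allP hierarchy p)
        else ⟨S1, fun _ hx => hx, fun _ hx => Or.inl hx⟩
      let r2 := pvGoA hierarchy r1.val ps' (fun q hq => hps q (List.mem_cons_of_mem _ hq))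
      ⟨r2.val,
        fun x hx => r2.property.1 x (r1.property.1 x (hS1 x hx)),
        fun x hx => by
          rcases r2.property.2 x hx with hx1 | hall
          · rcases r1.property.2 x hx1 with hx2 | hall
            · rcases (PySem.Set.mem_add _ _ _).1 hx2 with hx3 | rfl
              · exact Or.inl hx3
              · exact Or.inr (hps x (List.mem_cons_self))
            · exact Or.inr hall
          · exact Or.inr hall⟩
  termination_by (pvCount hierarchy S, ps.length)
  decreasing_by
  all_goals first
  | exact Prod.Lex.right _ (Nat.lt_succ_self _)
  | exact Prod.Lex.left _ _
      (pvCount_lt hierarchy S _ hS1 _ (hps _ List.mem_cons_self) hmem hpS1)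
  | (have hle : pvCount hierarchy r1.val ≤ pvCount hierarchy S :=
       pvCount_le hierarchy S r1.val (fun y hy => r1.2.1 y (hS1 y hy))
     rcases Nat.lt_or_ge (pvCount hierarchy r1.val) (pvCount hierarchy S) with hlt | hge
     · exact Prod.Lex.left _ _ hlt
     · rw [Nat.le_antisymm hle hge]
       exact Prod.Lex.right _ (Nat.lt_succ_self _))

-- A: expanded_genres = set(genres); for genre in genres: add_parents(genre); return sorted(...)
def ensure_parent_genres (genres : List String) (hierarchy : List (String × List String)) : List String :=
  let expanded := PySem.Set.ofList genres
  let final := genres.foldl (fun S g =>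
    if PySem.Dict.contains (PySem.Dict.mk hierarchy) g then
      (pvGoA hierarchy S (pvParents hierarchy g) (pvParents_sub_allP hierarchy g)).val
    else S) expanded
  PySem.List.sorted final (fun x => x) false

-- ===== PORT B =====
-- one iteration of B's inner 'for parent in ...' loop over the state (expanded, stack)
def pvStepB (acc : PySem.Set String × List String) (parent : String) :
    PySem.Set String × List String :=
  if parent ∈ acc.1 then acc else (PySem.Set.add acc.1 parent, acc.2 ++ [parent])

-- the fold fact B's termination proof cites: the inner loop only grows the visited set,
-- and either visits a new parent (measure drops) or leaves the state unchanged
theorem pvStepB_fold_small (hierarchy : List (String × List String)) (parents : List String)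
    (hp : ∀ p ∈ parents, p ∈ pvAllP hierarchy) :
    ∀ (S : PySem.Set String) (st : List String),
      (∀ x ∈ S, x ∈ (parents.foldl pvStepB (S, st)).1) ∧
      (pvCount hierarchy (parents.foldl pvStepB (S, st)).1 < pvCount hierarchy S ∨
        parents.foldl pvStepB (S, st) = (S, st)) := by
  induction parents with
  | nil => exact fun S st => ⟨fun _ hx => hx, Or.inr rfl⟩
  | cons p ps ih =>
    intro S st
    have hps : ∀ q ∈ ps, q ∈ pvAllP hierarchy := fun q hq => hp q (List.mem_cons_of_mem _ hq)
    by_cases hmem : p ∈ S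
    · simpa [List.foldl_cons, pvStepB, hmem] using ih hps S st
    · have hstep : List.foldl pvStepB (S, st) (p :: ps) =
          List.foldl pvStepB (PySem.Set.add S p, st ++ [p]) ps := by
        simp [List.foldl_cons, pvStepB, hmem]
      rw [hstep]
      obtain ⟨h1, h2⟩ := ih hps (PySem.Set.add S p) (st ++ [p])
      have hS1 : ∀ x ∈ S, x ∈ PySem.Set.add S p := fun x hx => (PySem.Set.mem_add _ _ _).2 (Or.inl hx)
      have hlt : pvCount hierarchy (PySem.Set.add S p) < pvCount hierarchy S :=
        pvCount_lt hierarchy S (PySem.Set.add S p) hS1 p (hp p List.mem_cons_self) hmem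
          ((PySem.Set.mem_add _ _ _).2 (Or.inr rfl))
      refine ⟨fun x hx => h1 x (hS1 x hx), Or.inl ?_⟩
      rcases h2 with hlt' | heq
      · exact Nat.lt_trans hlt' hlt
      · rw [heq]; exact hlt

-- B's 'while stack:' loop; stack.pop() takes the LAST element
def pvLoopB (hierarchy : List (String × List String)) (S : PySem.Set String)
    (stack : List String) : PySem.Set String :=
  match stack with
  | [] => S
  | x :: xs =>
    let genre := (x :: xs).getLast (List.cons_ne_nil x xs)
    let rest := (x :: xs).dropLast
    let ss := (pvParents hierarchy genre).foldl pvStepB (S, rest)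
    pvLoopB hierarchy ss.1 ss.2
  termination_by (pvCount hierarchy S, stack.length)
  decreasing_by
    rcases (pvStepB_fold_small hierarchy (pvParents hierarchy genre)
        (pvParents_sub_allP hierarchy genre) S rest).2 with hlt | heq
    · exact Prod.Lex.left _ _ hlt
    · have h1 : ss.1 = S := by rw [show ss = (S, rest) from heq]
      have h2 : ss.2 = rest := by rw [show ss = (S, rest) from heq]
      rw [h1, h2]
      exact Prod.Lex.right _ (by
        have : rest.length < (x :: xs).length := by
          simp [rest, List.length_dropLast]
        exact this)

-- B: expanded = set(genres); stack = list(genres); while stack: ...; return sorted(expanded)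
def ensure_parent_genres_alt (genres : List String) (hierarchy : List (String × List String)) : List String :=
  let expanded := PySem.Set.ofList genres
  let final := pvLoopB hierarchy expanded genres
  PySem.List.sorted final (fun x => x) false

-- ===== PRECONDITION & SPEC =====
def Spec_ensure_parent_genres (genres : List String) (hierarchy : List (String × List String)) (out : List String) : Prop := out = ensure_parent_genres_alt genres hierarchy
instance (genres : List String) (hierarchy : List (String × List String)) (out : List String) : Decidable (Spec_ensure_parent_genres genres hierarchy out) := by unfold Spec_ensure_parent_genres; infer_instance

-- ===== CLAIM (what is proved, stated in full; the proofs are below) =====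
def Claim_equal_ensure_parent_genres : Prop := ∀ (genres : List String) (hierarchy : List (String × List String)), Dom_ensure_parent_genres genres hierarchy → Spec_ensure_parent_genres genres hierarchy (ensure_parent_genres genres hierarchy)

-- ===== LEMMAS AND PROOFS =====

-- reachability: the genres together with all their (transitive) parents
inductive pvReach (genres : List String) (hierarchy : List (String × List String)) : String → Prop
  | base (g : String) (h : g ∈ genres) : pvReach genres hierarchy g
  | step (g p : String) (hg : pvReach genres hierarchy g)
      (hp : p ∈ pvParents hierarchy g) : pvReach genres hierarchy p

-- pvGoA depends on its set argument only (proofs are irrelevant)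
theorem pvGoA_congr (hierarchy : List (String × List String)) {S S' : PySem.Set String}
    (h : S = S') (ps : List String) (hps hps' : ∀ p ∈ ps, p ∈ pvAllP hierarchy) :
    (pvGoA hierarchy S ps hps).val = (pvGoA hierarchy S' ps hps').val := by
  subst h; rfl

-- full spec of A's helper recursion, by functional induction
theorem pvGoA_spec (hierarchy : List (String × List String)) (Q : String → Prop)
    (hQc : ∀ a p, Q a → p ∈ pvParents hierarchy a → Q p)
    (S : PySem.Set String) (ps : List String) (hps : ∀ p ∈ ps, p ∈ pvAllP hierarchy) :
    (S.Nodup → (pvGoA hierarchy S ps hps).val.Nodup) ∧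
    (∀ p ∈ ps, p ∈ (pvGoA hierarchy S ps hps).val) ∧
    (∀ x ∈ (pvGoA hierarchy S ps hps).val, x ∉ S →
      ∀ q ∈ pvParents hierarchy x, q ∈ (pvGoA hierarchy S ps hps).val) ∧
    ((∀ x ∈ S, Q x) → (∀ p ∈ ps, Q p) → ∀ x ∈ (pvGoA hierarchy S ps hps).val, Q x) := by
  induction S, ps, hps using pvGoA.induct hierarchy with
  | case1 S hps _ =>
    rw [pvGoA]
    exact ⟨fun h => h, fun q hq => absurd hq (List.not_mem_nil),
      fun x hx hxS => absurd hx hxS, fun hQS _ => hQS⟩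
  | case2 S p ps' hps hmem _ ih =>
    have hred : pvGoA hierarchy S (p :: ps') hps =
        pvGoA hierarchy S ps' (fun q hq => hps q (List.mem_cons_of_mem _ hq)) := by
      rw [pvGoA]; simp [hmem]
    rw [hred]
    obtain ⟨g1, g2, g3, g4⟩ := ih
    have hmono : ∀ x ∈ S, x ∈ (pvGoA hierarchy S ps'
        (fun q hq => hps q (List.mem_cons_of_mem _ hq))).val :=
      (pvGoA hierarchy S ps' (fun q hq => hps q (List.mem_cons_of_mem _ hq))).2.1
    refine ⟨g1, ?_, g3, fun hQS hQps => g4 hQS (fun q hq => hQps q (List.mem_cons_of_mem _ hq))⟩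
    intro q hq
    rcases List.mem_cons.1 hq with rfl | hq'
    · exact hmono q hmem
    · exact g2 q hq'
  | case3 S p ps' hps hmem S1 hS1 hpS1 r1 hps2 ih1 ih1' ih2 ih2' hgen1 hgen2 =>
    clear ih1 ih2 hgen1 hgen2 r1 hpS1
    have hpadd : p ∈ S.add p := (PySem.Set.mem_add _ _ _).2 (Or.inr rfl)
    by_cases hc : PySem.Dict.contains (PySem.Dict.mk hierarchy) p
    · rw [dif_pos hc] at ih2'
      have hred : (pvGoA hierarchy S (p :: ps') hps).val =
          (pvGoA hierarchy (↑(pvGoA hierarchy (S.add p) (pvParents hierarchy p)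
            (pvParents_sub_allP hierarchy p)) : PySem.Set String) ps'
            (fun q hq => hps q (List.mem_cons_of_mem _ hq))).val := by
        rw [pvGoA]
        simp only [hmem]
        rw [dif_neg not_false]
        exact pvGoA_congr hierarchy (by rw [dif_pos hc]) ps' _ _
      rw [hred]
      obtain ⟨i1, i2, i3, i4⟩ := ih1'
      obtain ⟨o1, o2, o3, o4⟩ := ih2'
      have hmonoIn : ∀ x ∈ S.add p, x ∈ (pvGoA hierarchy (S.add p) (pvParents hierarchy p)
          (pvParents_sub_allP hierarchy p)).val :=
        (pvGoA hierarchy (S.add p) (pvParents hierarchy p) (pvParents_sub_allP hierarchy p)).2.1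
      have hmonoOut : ∀ x ∈ (pvGoA hierarchy (S.add p) (pvParents hierarchy p)
            (pvParents_sub_allP hierarchy p)).val,
          x ∈ (pvGoA hierarchy (↑(pvGoA hierarchy (S.add p) (pvParents hierarchy p)
            (pvParents_sub_allP hierarchy p)) : PySem.Set String) ps'
            (fun q hq => hps q (List.mem_cons_of_mem _ hq))).val :=
        (pvGoA hierarchy _ ps' (fun q hq => hps q (List.mem_cons_of_mem _ hq))).2.1
      refine ⟨?_, ?_, ?_, ?_⟩
      · exact fun hnd => o1 (i1 (PySem.Set.nodup_add S p hnd))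
      · intro q hq
        rcases List.mem_cons.1 hq with rfl | hq'
        · exact hmonoOut q (hmonoIn q hpadd)
        · exact o2 q hq'
      · intro x hx hxS q hq
        by_cases hx1 : x ∈ (pvGoA hierarchy (S.add p) (pvParents hierarchy p)
            (pvParents_sub_allP hierarchy p)).val
        · by_cases hx2 : x ∈ S.add p
          · rcases (PySem.Set.mem_add _ _ _).1 hx2 with h' | rfl
            · exact absurd h' hxS
            · exact hmonoOut q (i2 q hq)
          · exact hmonoOut q (i3 x hx1 hx2 q hq)
        · exact o3 x hx hx1 q hq
      · intro hQS hQps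
        have hQp : Q p := hQps p List.mem_cons_self
        have hQS1 : ∀ x ∈ S.add p, Q x := by
          intro x hx
          rcases (PySem.Set.mem_add _ _ _).1 hx with h' | rfl
          · exact hQS x h'
          · exact hQp
        exact o4 (i4 hQS1 (fun q hq => hQc p q hQp hq))
          (fun q hq => hQps q (List.mem_cons_of_mem _ hq))
    · rw [dif_neg hc] at ih2'
      have hred : (pvGoA hierarchy S (p :: ps') hps).val =
          (pvGoA hierarchy (S.add p) ps'
            (fun q hq => hps q (List.mem_cons_of_mem _ hq))).val := by
        rw [pvGoA]
        simp only [hmem]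
        rw [dif_neg not_false]
        exact pvGoA_congr hierarchy (by rw [dif_neg hc]) ps' _ _
      rw [hred]
      obtain ⟨o1, o2, o3, o4⟩ := ih2'
      have hpar : pvParents hierarchy p = [] := by
        unfold pvParents
        rw [Bool.not_eq_true] at hc
        exact PySem.Dict.getD_of_not_contains _ _ hc
      have hmono : ∀ x ∈ S.add p, x ∈ (pvGoA hierarchy (S.add p) ps'
          (fun q hq => hps q (List.mem_cons_of_mem _ hq))).val :=
        (pvGoA hierarchy (S.add p) ps' (fun q hq => hps q (List.mem_cons_of_mem _ hq))).2.1
      refine ⟨?_, ?_, ?_, ?_⟩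
      · exact fun hnd => o1 (PySem.Set.nodup_add S p hnd)
      · intro q hq
        rcases List.mem_cons.1 hq with rfl | hq'
        · exact hmono q hpadd
        · exact o2 q hq'
      · intro x hx hxS q hq
        by_cases hx2 : x ∈ S.add p
        · rcases (PySem.Set.mem_add _ _ _).1 hx2 with h' | rfl
          · exact absurd h' hxS
          · rw [hpar] at hq
            exact absurd hq (List.not_mem_nil)
        · exact o3 x hx hx2 q hq
      · intro hQS hQps
        have hQp : Q p := hQps p List.mem_cons_self
        have hQS1 : ∀ x ∈ S.add p, Q x := by
          intro x hx
          rcases (PySem.Set.mem_add _ _ _).1 hx with h' | rfl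
          · exact hQS x h'
          · exact hQp
        exact o4 hQS1 (fun q hq => hQps q (List.mem_cons_of_mem _ hq))

-- full spec of B's inner fold
theorem pvStepB_fold_spec (parents : List String) :
    ∀ (S : PySem.Set String) (st : List String),
      (∀ x ∈ S, x ∈ (parents.foldl pvStepB (S, st)).1) ∧
      (∀ p ∈ parents, p ∈ (parents.foldl pvStepB (S, st)).1) ∧
      (∀ x ∈ (parents.foldl pvStepB (S, st)).1, x ∈ S ∨ x ∈ parents) ∧
      (∀ y ∈ st, y ∈ (parents.foldl pvStepB (S, st)).2) ∧
      (∀ x ∈ (parents.foldl pvStepB (S, st)).1, x ∉ S → x ∈ (parents.foldl pvStepB (S, st)).2) ∧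
      (∀ y ∈ (parents.foldl pvStepB (S, st)).2, y ∈ st ∨ y ∈ (parents.foldl pvStepB (S, st)).1) ∧
      (S.Nodup → (parents.foldl pvStepB (S, st)).1.Nodup) := by
  induction parents with
  | nil =>
    intro S st
    exact ⟨fun _ hx => hx, fun _ hp => absurd hp (List.not_mem_nil),
      fun x hx => Or.inl hx, fun _ hy => hy, fun x hx hxS => absurd hx hxS,
      fun y hy => Or.inl hy, fun h => h⟩
  | cons p ps ih =>
    intro S st
    by_cases hmem : p ∈ S
    · have hf : (p :: ps).foldl pvStepB (S, st) = ps.foldl pvStepB (S, st) := by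
        simp [pvStepB, hmem]
      rw [hf]
      obtain ⟨a1, a2, a3, a4, a5, a6, a7⟩ := ih S st
      refine ⟨a1, ?_, fun x hx => (a3 x hx).imp id (List.mem_cons_of_mem _), a4, a5, a6, a7⟩
      intro q hq
      rcases List.mem_cons.1 hq with rfl | hq'
      · exact a1 q hmem
      · exact a2 q hq'
    · have hf : (p :: ps).foldl pvStepB (S, st) = ps.foldl pvStepB (S.add p, st ++ [p]) := by
        simp [pvStepB, hmem]
      rw [hf]
      obtain ⟨a1, a2, a3, a4, a5, a6, a7⟩ := ih (S.add p) (st ++ [p])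
      have hS1 : ∀ x ∈ S, x ∈ S.add p := fun x hx => (PySem.Set.mem_add _ _ _).2 (Or.inl hx)
      have hpmem : p ∈ S.add p := (PySem.Set.mem_add _ _ _).2 (Or.inr rfl)
      refine ⟨fun x hx => a1 x (hS1 x hx), ?_, ?_, ?_, ?_, ?_, ?_⟩
      · intro q hq
        rcases List.mem_cons.1 hq with rfl | hq'
        · exact a1 q hpmem
        · exact a2 q hq'
      · intro x hx
        rcases a3 x hx with h | h
        · rcases (PySem.Set.mem_add _ _ _).1 h with h' | rfl
          · exact Or.inl h'
          · exact Or.inr List.mem_cons_self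
        · exact Or.inr (List.mem_cons_of_mem _ h)
      · exact fun y hy => a4 y (List.mem_append_left _ hy)
      · intro x hx hxS
        by_cases hx1 : x ∈ S.add p
        · rcases (PySem.Set.mem_add _ _ _).1 hx1 with h' | rfl
          · exact absurd h' hxS
          · exact a4 x (List.mem_append_right _ List.mem_cons_self)
        · exact a5 x hx hx1
      · intro y hy
        rcases a6 y hy with h | h
        · rcases List.mem_append.1 h with h' | h'
          · exact Or.inl h'
          · rcases List.mem_cons.1 h' with rfl | h''
            · exact Or.inr (a1 y hpmem)
            · exact absurd h'' (List.not_mem_nil)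
        · exact Or.inr h
      · exact fun hnd => a7 (PySem.Set.nodup_add S p hnd)

-- full spec of B's loop, by functional induction
theorem pvLoopB_spec (hierarchy : List (String × List String)) (Q : String → Prop)
    (hQc : ∀ a p, Q a → p ∈ pvParents hierarchy a → Q p)
    (S : PySem.Set String) (stack : List String) :
    (∀ x ∈ S, x ∈ pvLoopB hierarchy S stack) ∧
    (S.Nodup → (pvLoopB hierarchy S stack).Nodup) ∧
    ((∀ x ∈ S, x ∈ stack ∨ ∀ q ∈ pvParents hierarchy x, q ∈ S) →
      ∀ x ∈ pvLoopB hierarchy S stack, ∀ q ∈ pvParents hierarchy x,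
        q ∈ pvLoopB hierarchy S stack) ∧
    ((∀ x ∈ S, Q x) → (∀ y ∈ stack, Q y) → ∀ x ∈ pvLoopB hierarchy S stack, Q x) := by
  induction S, stack using pvLoopB.induct hierarchy with
  | case1 S =>
    rw [pvLoopB]
    refine ⟨fun _ hx => hx, fun h => h, ?_, fun hS _ => hS⟩
    intro hinv x hx q hq
    rcases hinv x hx with h | h
    · exact absurd h (List.not_mem_nil)
    · exact h q hq
  | case2 S x xs genre rest ss ih =>
    have hrw : pvLoopB hierarchy S (x :: xs) = pvLoopB hierarchy ss.1 ss.2 := by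
      rw [pvLoopB]
    rw [hrw]
    obtain ⟨f1, f2, f3, f4, f5, f6, f7⟩ := pvStepB_fold_spec (pvParents hierarchy genre) S rest
    obtain ⟨i1, i2, i3, i4⟩ := ih
    have hstk : (x :: xs) = rest ++ [genre] :=
      (List.dropLast_append_getLast (List.cons_ne_nil x xs)).symm
    have hgmem : genre ∈ x :: xs := List.getLast_mem _
    refine ⟨fun y hy => i1 y (f1 y hy), fun hnd => i2 (f7 hnd), ?_, ?_⟩
    · intro hinv
      apply i3
      intro y hy
      by_cases hyS : y ∈ S
      · rcases hinv y hyS with hstk' | hcl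
        · rw [hstk] at hstk'
          rcases List.mem_append.1 hstk' with h' | h'
          · exact Or.inl (f4 y h')
          · rcases List.mem_cons.1 h' with rfl | h''
            · exact Or.inr (fun q hq => f2 q hq)
            · exact absurd h'' (List.not_mem_nil)
        · exact Or.inr (fun q hq => f1 q (hcl q hq))
      · exact Or.inl (f5 y hy hyS)
    · intro hS hstack
      have hQg : Q genre := hstack genre hgmem
      have hSS : ∀ y ∈ ss.1, Q y := by
        intro y hy
        rcases f3 y hy with h | h
        · exact hS y h
        · exact hQc genre y hQg h
      apply i4 hSS
      intro y hy
      rcases f6 y hy with h | h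
      · exact hstack y (by rw [hstk]; exact List.mem_append_left _ h)
      · exact hSS y h

-- one step of A's outer 'for genre in genres' loop (η-equal to the lambda in the port)
def pvStepA (hierarchy : List (String × List String)) (S : PySem.Set String) (g : String) :
    PySem.Set String :=
  if PySem.Dict.contains (PySem.Dict.mk hierarchy) g then
    (pvGoA hierarchy S (pvParents hierarchy g) (pvParents_sub_allP hierarchy g)).val
  else S

-- spec of A's outer loop
theorem pvFoldA_spec (hierarchy : List (String × List String)) (Q : String → Prop)
    (hQc : ∀ a p, Q a → p ∈ pvParents hierarchy a → Q p) :
    ∀ (gs : List String) (S : PySem.Set String),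
      (∀ x ∈ S, x ∈ gs.foldl (pvStepA hierarchy) S) ∧
      (S.Nodup → (gs.foldl (pvStepA hierarchy) S).Nodup) ∧
      (∀ x ∈ gs.foldl (pvStepA hierarchy) S, x ∉ S →
        ∀ q ∈ pvParents hierarchy x, q ∈ gs.foldl (pvStepA hierarchy) S) ∧
      (∀ g ∈ gs, ∀ q ∈ pvParents hierarchy g, q ∈ gs.foldl (pvStepA hierarchy) S) ∧
      ((∀ x ∈ S, Q x) → (∀ g ∈ gs, Q g) → ∀ x ∈ gs.foldl (pvStepA hierarchy) S, Q x) := by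
  intro gs
  induction gs with
  | nil =>
    intro S
    exact ⟨fun _ hx => hx, fun h => h, fun x hx hxS => absurd hx hxS,
      fun g hg => absurd hg (List.not_mem_nil), fun hQS _ => hQS⟩
  | cons g gs ih =>
    intro S
    have hfold : (g :: gs).foldl (pvStepA hierarchy) S =
        gs.foldl (pvStepA hierarchy) (pvStepA hierarchy S g) := List.foldl_cons ..
    rw [hfold]
    obtain ⟨i1, i2, i3, i4, i5⟩ := ih (pvStepA hierarchy S g)
    by_cases hc : PySem.Dict.contains (PySem.Dict.mk hierarchy) g
    · have hS' : pvStepA hierarchy S g =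
          (pvGoA hierarchy S (pvParents hierarchy g) (pvParents_sub_allP hierarchy g)).val := by
        unfold pvStepA; rw [if_pos hc]
      obtain ⟨s1, s2, s3, s4⟩ := pvGoA_spec hierarchy Q hQc S (pvParents hierarchy g)
        (pvParents_sub_allP hierarchy g)
      have smono : ∀ x ∈ S, x ∈ pvStepA hierarchy S g := by
        rw [hS']
        exact (pvGoA hierarchy S (pvParents hierarchy g) (pvParents_sub_allP hierarchy g)).2.1
      refine ⟨fun x hx => i1 x (smono x hx), fun hnd => i2 (by rw [hS']; exact s1 hnd),
        ?_, ?_, ?_⟩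
      · intro x hx hxS q hq
        by_cases hx1 : x ∈ pvStepA hierarchy S g
        · have : q ∈ pvStepA hierarchy S g := by
            rw [hS'] at hx1 ⊢
            exact s3 x hx1 hxS q hq
          exact i1 q this
        · exact i3 x hx hx1 q hq
      · intro g' hg' q hq
        rcases List.mem_cons.1 hg' with rfl | hg''
        · refine i1 q ?_
          rw [hS']
          exact s2 q hq
        · exact i4 g' hg'' q hq
      · intro hQS hQgs
        refine i5 ?_ (fun g' hg' => hQgs g' (List.mem_cons_of_mem _ hg'))
        rw [hS']
        exact s4 hQS (fun q hq => hQc g q (hQgs g List.mem_cons_self) hq)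
    · have hS' : pvStepA hierarchy S g = S := by
        unfold pvStepA; rw [if_neg hc]
      rw [hS'] at i1 i2 i3 i4 i5 ⊢
      have hpar : pvParents hierarchy g = [] := by
        unfold pvParents
        rw [Bool.not_eq_true] at hc
        exact PySem.Dict.getD_of_not_contains _ _ hc
      refine ⟨i1, i2, i3, ?_, ?_⟩
      · intro g' hg' q hq
        rcases List.mem_cons.1 hg' with rfl | hg''
        · rw [hpar] at hq
          exact absurd hq (List.not_mem_nil)
        · exact i4 g' hg'' q hq
      · exact fun hQS hQgs => i5 hQS (fun g' hg' => hQgs g' (List.mem_cons_of_mem _ hg'))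

-- A's final set: exactly the reachable genres, without duplicates
theorem pvA_char (genres : List String) (hierarchy : List (String × List String)) :
    (genres.foldl (pvStepA hierarchy) (PySem.Set.ofList genres)).Nodup ∧
    (∀ x, x ∈ genres.foldl (pvStepA hierarchy) (PySem.Set.ofList genres) ↔
      pvReach genres hierarchy x) := by
  obtain ⟨a1, a2, a3, a4, a5⟩ := pvFoldA_spec hierarchy (pvReach genres hierarchy)
    (fun a p ha hp => pvReach.step a p ha hp) genres (PySem.Set.ofList genres)
  refine ⟨a2 (PySem.Set.nodup_ofList genres), fun x => ⟨?_, ?_⟩⟩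
  · exact a5 (fun y hy => pvReach.base y ((PySem.Set.mem_ofList _ _).1 hy))
      (fun g hg => pvReach.base g hg) x
  · intro h
    induction h with
    | base g hg => exact a1 g ((PySem.Set.mem_ofList _ _).2 hg)
    | step g p hg hp ihg =>
      by_cases hgS : g ∈ genres
      · exact a4 g hgS p hp
      · exact a3 g ihg (fun hmem => hgS ((PySem.Set.mem_ofList _ _).1 hmem)) p hp

-- B's final set: exactly the reachable genres, without duplicates
theorem pvB_char (genres : List String) (hierarchy : List (String × List String)) :
    (pvLoopB hierarchy (PySem.Set.ofList genres) genres).Nodup ∧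
    (∀ x, x ∈ pvLoopB hierarchy (PySem.Set.ofList genres) genres ↔
      pvReach genres hierarchy x) := by
  obtain ⟨b1, b2, b3, b4⟩ := pvLoopB_spec hierarchy (pvReach genres hierarchy)
    (fun a p ha hp => pvReach.step a p ha hp) (PySem.Set.ofList genres) genres
  have hclosed := b3 (fun x hx => Or.inl ((PySem.Set.mem_ofList _ _).1 hx))
  refine ⟨b2 (PySem.Set.nodup_ofList genres), fun x => ⟨?_, ?_⟩⟩
  · exact b4 (fun y hy => pvReach.base y ((PySem.Set.mem_ofList _ _).1 hy))
      (fun g hg => pvReach.base g hg) x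
  · intro h
    induction h with
    | base g hg => exact b1 g ((PySem.Set.mem_ofList _ _).2 hg)
    | step g p hg hp ihg => exact hclosed g ihg p hp

-- ===== VERDICT (by name: the statement is the Claim_ definition above) =====
theorem ensure_parent_genres_spec : Claim_equal_ensure_parent_genres := by
  unfold Claim_equal_ensure_parent_genres
  intro genres hierarchy _
  unfold Spec_ensure_parent_genres
  show PySem.List.sorted (genres.foldl (pvStepA hierarchy) (PySem.Set.ofList genres))
      (fun x => x) false =
    PySem.List.sorted (pvLoopB hierarchy (PySem.Set.ofList genres) genres) (fun x => x) false
  obtain ⟨hAnd, hAmem⟩ := pvA_char genres hierarchy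
  obtain ⟨hBnd, hBmem⟩ := pvB_char genres hierarchy
  exact PySem.List.sorted_eq_sorted_of_perm _ _ _ (fun a b hab => hab)
    ((List.perm_ext_iff_of_nodup hAnd hBnd).2
      (fun a => (hAmem a).trans (hBmem a).symm))
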